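-- pv_equiv track=rewrite | github.com/eudoxia0/spaced-repetition-tools | poem_to_anki.py | convert_poem_to_anki_flashcards
-- ===== SOURCE A (Python) =====
-- def convert_poem_to_anki_flashcards(poem):
--     flashcards = []
--     title_and_author = f"{poem[0]} by {poem[1]}"
--     flashcards.append([f"<i>Beginning</i>", poem[2]])
--
--     flashcards.append([f"<i>Beginning</i><br>{poem[2]}", poem[3]])
--
--     for i in range(4, len(poem)):
--         flashcards.append([f"{poem[i - 2]}<br>{poem[i - 1]}", poem[i]])
--
--     return flashcards
-- ===== SOURCE B (Python) =====
-- def convert_poem_to_anki_flashcards(poem):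
--     # One uniform sliding-window pass over an augmented line list.
--     lines = ["<i>Beginning</i>", poem[2], poem[3]] + list(poem[4:])
--     return [["<br>".join(lines[max(0, j - 2):j]), lines[j]]
--             for j in range(1, len(lines))]
-- ===== Notes on version B (the rewrite author's own statement) =====
-- stated objective: simpler
-- what changed: Replaces the two special-cased appends plus an index loop by one uniform sliding-window comprehension over an augmented line list prefixed with the Beginning marker.
import Mathlib
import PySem

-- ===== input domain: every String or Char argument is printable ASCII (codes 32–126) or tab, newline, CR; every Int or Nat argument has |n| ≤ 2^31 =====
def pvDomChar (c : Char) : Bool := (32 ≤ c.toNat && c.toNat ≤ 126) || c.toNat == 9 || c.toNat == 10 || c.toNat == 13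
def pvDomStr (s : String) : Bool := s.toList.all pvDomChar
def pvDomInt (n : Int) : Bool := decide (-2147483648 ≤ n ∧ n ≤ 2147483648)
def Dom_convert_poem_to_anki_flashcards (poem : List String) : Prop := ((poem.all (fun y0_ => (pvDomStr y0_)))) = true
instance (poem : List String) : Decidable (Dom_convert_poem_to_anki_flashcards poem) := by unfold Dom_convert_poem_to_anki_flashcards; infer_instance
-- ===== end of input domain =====

-- B folds A's two special-cased appends and its index loop into one uniform
-- sliding-window pass over an augmented line list (objective: simpler).

-- ===== PORT A =====
def convert_poem_to_anki_flashcards (poem : List String) : List (List String) :=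
  let flashcards : List (List String) := []
  let _title_and_author :=
    PySem.List.pyGetD poem 0 "" ++ " by " ++ PySem.List.pyGetD poem 1 ""
  let flashcards := flashcards ++ [["<i>Beginning</i>", PySem.List.pyGetD poem 2 ""]]
  let flashcards := flashcards ++
    [["<i>Beginning</i><br>" ++ PySem.List.pyGetD poem 2 "", PySem.List.pyGetD poem 3 ""]]
  (PySem.List.pyRange 4 (poem.length : Int) 1).foldl
    (fun acc i =>
      acc ++ [[PySem.List.pyGetD poem (i - 2) "" ++ "<br>" ++ PySem.List.pyGetD poem (i - 1) "",
               PySem.List.pyGetD poem i ""]])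
    flashcards

-- ===== PORT B =====
def convert_poem_to_anki_flashcards_alt (poem : List String) : List (List String) :=
  let lines : List String :=
    ["<i>Beginning</i>", PySem.List.pyGetD poem 2 "", PySem.List.pyGetD poem 3 ""] ++
      PySem.List.slice poem (some 4) none
  (PySem.List.pyRange 1 (lines.length : Int) 1).map
    (fun j =>
      [PySem.Str.join "<br>" (PySem.List.slice lines (some (max 0 (j - 2))) (some j)),
       PySem.List.pyGetD lines j ""])

-- ===== PRECONDITION & SPEC =====
-- Python A raises IndexError (poem[0]..poem[3]) on poems with fewer than 4 lines, and B raises there too.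
def Pre_convert_poem_to_anki_flashcards (poem : List String) : Prop := 4 ≤ poem.length
instance (poem : List String) : Decidable (Pre_convert_poem_to_anki_flashcards poem) := by
  unfold Pre_convert_poem_to_anki_flashcards; infer_instance
def pvWitness_convert_poem_to_anki_flashcards : List String :=
  ["Title", "Author", "line one", "line two", "line three"]
def Spec_convert_poem_to_anki_flashcards (poem : List String) (out : List (List String)) : Prop := out = convert_poem_to_anki_flashcards_alt poem
instance (poem : List String) (out : List (List String)) : Decidable (Spec_convert_poem_to_anki_flashcards poem out) := by unfold Spec_convert_poem_to_anki_flashcards; infer_instance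

-- ===== CLAIM (what is proved, stated in full; the proofs are below) =====
def Claim_equal_convert_poem_to_anki_flashcards : Prop := ∀ (poem : List String), Dom_convert_poem_to_anki_flashcards poem → Pre_convert_poem_to_anki_flashcards poem → Spec_convert_poem_to_anki_flashcards poem (convert_poem_to_anki_flashcards poem)

-- ===== LEMMAS AND PROOFS =====

-- the common shape of both loops: successive-pair cards over the tail
def pvWindows : String → String → List String → List (List String)
  | _, _, [] => []
  | x, y, z :: r => [x ++ "<br>" ++ y, z] :: pvWindows y z r

theorem pv_join_pair (x y : String) : PySem.Str.join "<br>" [x, y] = x ++ "<br>" ++ y := by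
  apply String.toList_injective
  simp [PySem.Str.join, PySem.Chars.join_cons_cons, PySem.Chars.join_singleton]

theorem pvA_loop (xs : List String) (s : Int) (acc : List (List String))
    (hs : 2 ≤ s) :
    (PySem.List.pyRange s (xs.length : Int) 1).foldl
      (fun acc i =>
        acc ++ [[PySem.List.pyGetD xs (i - 2) "" ++ "<br>" ++ PySem.List.pyGetD xs (i - 1) "",
                 PySem.List.pyGetD xs i ""]])
      acc
    = acc ++ pvWindows (PySem.List.pyGetD xs (s - 2) "") (PySem.List.pyGetD xs (s - 1) "")
        (xs.drop s.toNat) := by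
  by_cases h : (xs.length : Int) ≤ s
  · rw [PySem.List.pyRange_one_eq_nil h]
    have : xs.drop s.toNat = [] := List.drop_eq_nil_of_le (by omega)
    simp [this, pvWindows]
  · push_neg at h
    rw [PySem.List.pyRange_one_cons h]
    simp only [List.foldl_cons]
    rw [pvA_loop xs (s + 1) _ (by omega)]
    have hd : xs.drop s.toNat = PySem.List.pyGetD xs s "" :: xs.drop (s + 1).toNat := by
      have hlt : s.toNat < xs.length := by omega
      have ht : (s + 1).toNat = s.toNat + 1 := by omega
      rw [ht, List.drop_eq_getElem_cons hlt, PySem.List.pyGetD_eq_getElem xs "" (by omega) h]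
    rw [hd]
    simp only [pvWindows]
    have e1 : s + 1 - 2 = s - 1 := by ring
    have e2 : s + 1 - 1 = s := by ring
    rw [e1, e2]
    simp
termination_by (xs.length - s).toNat
decreasing_by omega

theorem pvB_loop (xs : List String) (s : Int) (hs : 2 ≤ s) :
    (PySem.List.pyRange s (xs.length : Int) 1).map
      (fun j =>
        [PySem.Str.join "<br>" (PySem.List.slice xs (some (max 0 (j - 2))) (some j)),
         PySem.List.pyGetD xs j ""])
    = pvWindows (PySem.List.pyGetD xs (s - 2) "") (PySem.List.pyGetD xs (s - 1) "")
        (xs.drop s.toNat) := by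
  by_cases h : (xs.length : Int) ≤ s
  · rw [PySem.List.pyRange_one_eq_nil h]
    have : xs.drop s.toNat = [] := List.drop_eq_nil_of_le (by omega)
    simp [this, pvWindows]
  · push_neg at h
    rw [PySem.List.pyRange_one_cons h]
    simp only [List.map_cons]
    rw [pvB_loop xs (s + 1) (by omega)]
    have hd : xs.drop s.toNat = PySem.List.pyGetD xs s "" :: xs.drop (s + 1).toNat := by
      have hlt : s.toNat < xs.length := by omega
      have ht : (s + 1).toNat = s.toNat + 1 := by omega
      rw [ht, List.drop_eq_getElem_cons hlt, PySem.List.pyGetD_eq_getElem xs "" (by omega) h]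
    rw [hd]
    simp only [pvWindows]
    have e1 : s + 1 - 2 = s - 1 := by ring
    have e2 : s + 1 - 1 = s := by ring
    rw [e1, e2]
    -- head card: slice xs (s-2) s = [xs[s-2], xs[s-1]]
    have hmax : max 0 (s - 2) = s - 2 := by omega
    have hsl : PySem.List.slice xs (some (s - 2)) (some s) =
        [PySem.List.pyGetD xs (s - 2) "", PySem.List.pyGetD xs (s - 1) ""] := by
      rw [PySem.List.slice_of_nonneg xs (by omega) (by omega) (by omega) (by omega)]
      rw [PySem.List.pyGetD_eq_getElem xs "" (by omega) (by omega),
          PySem.List.pyGetD_eq_getElem xs "" (by omega) (by omega)]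
      have h2 : s.toNat - (s-2).toNat = 2 := by omega
      rw [h2]
      apply List.ext_getElem
      · simp; omega
      · intro i h1 h2
        simp at h2
        interval_cases i <;> simp <;> congr 1 <;> omega
    rw [hmax, hsl, pv_join_pair]
termination_by (xs.length - s).toNat
decreasing_by omega

theorem pv_join_single (x : String) : PySem.Str.join "<br>" [x] = x := by
  simp [PySem.Str.join, PySem.Chars.join_singleton]

theorem pv_beg (x : String) : "<i>Beginning</i><br>" ++ x = "<i>Beginning</i>" ++ "<br>" ++ x := by
  apply String.toList_injective
  simp

theorem pv_main (poem : List String) (hpre : 4 ≤ poem.length) :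
    (let flashcards : List (List String) := []
     let _t := PySem.List.pyGetD poem 0 "" ++ " by " ++ PySem.List.pyGetD poem 1 ""
     let flashcards := flashcards ++ [["<i>Beginning</i>", PySem.List.pyGetD poem 2 ""]]
     let flashcards := flashcards ++
       [["<i>Beginning</i><br>" ++ PySem.List.pyGetD poem 2 "", PySem.List.pyGetD poem 3 ""]]
     (PySem.List.pyRange 4 (poem.length : Int) 1).foldl
       (fun acc i =>
         acc ++ [[PySem.List.pyGetD poem (i - 2) "" ++ "<br>" ++ PySem.List.pyGetD poem (i - 1) "",
                  PySem.List.pyGetD poem i ""]]) flashcards)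
    =
    (let lines : List String :=
       ["<i>Beginning</i>", PySem.List.pyGetD poem 2 "", PySem.List.pyGetD poem 3 ""] ++
         PySem.List.slice poem (some 4) none
     (PySem.List.pyRange 1 (lines.length : Int) 1).map
       (fun j =>
         [PySem.Str.join "<br>" (PySem.List.slice lines (some (max 0 (j - 2))) (some j)),
          PySem.List.pyGetD lines j ""])) := by
  have hsl4 : PySem.List.slice poem (some 4) none = poem.drop 4 := by
    rw [PySem.List.slice_from poem (by norm_num)]
    rfl
  simp only [hsl4, List.cons_append, List.nil_append]
  set a := PySem.List.pyGetD poem 2 "" with ha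
  set b := PySem.List.pyGetD poem 3 "" with hb
  set lines : List String := "<i>Beginning</i>" :: a :: b :: poem.drop 4 with hl
  have hLlen : (lines.length : Int) = (poem.length : Int) - 1 := by
    simp [hl]; omega
  -- A side
  rw [pvA_loop poem 4 _ (by omega)]
  -- B side
  have h3L : (3:Int) ≤ (lines.length : Int) := by omega
  rw [PySem.List.pyRange_one_append 1 3 (lines.length : Int) (by norm_num) h3L]
  rw [List.map_append]
  rw [pvB_loop lines 3 (by omega)]
  have hr12 : PySem.List.pyRange 1 3 1 = [1, 2] := by decide
  rw [hr12]
  have hg1 : PySem.List.pyGetD lines 1 "" = a := by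
    rw [PySem.List.pyGetD_eq_getElem lines "" (by omega) (by omega)]
    simp [hl]
  have hg2 : PySem.List.pyGetD lines 2 "" = b := by
    rw [PySem.List.pyGetD_eq_getElem lines "" (by omega) (by omega)]
    simp [hl]
  have hs1 : PySem.List.slice lines (some (max 0 ((1:Int) - 2))) (some 1) = ["<i>Beginning</i>"] := by
    norm_num
    rw [PySem.List.slice_to lines (by norm_num)]
    simp [hl]
  have hs2 : PySem.List.slice lines (some (max 0 ((2:Int) - 2))) (some 2) = ["<i>Beginning</i>", a] := by
    norm_num
    rw [PySem.List.slice_to lines (by norm_num)]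
    simp [hl]
  simp only [List.map_cons, List.map_nil, hg1, hg2, hs1, hs2]
  rw [pv_join_single, pv_join_pair]
  have hdrop3 : List.drop (Int.toNat 3) lines = List.drop (Int.toNat 4) poem := by
    simp [hl]
  have hg2p : PySem.List.pyGetD poem (4 - 2) "" = a := by
    rw [show (4:Int) - 2 = 2 from by norm_num]
  have hg3p : PySem.List.pyGetD poem (4 - 1) "" = b := by
    rw [show (4:Int) - 1 = 3 from by norm_num]
  have h12 : (3:Int) - 2 = 1 := by norm_num
  have h21 : (3:Int) - 1 = 2 := by norm_num
  rw [h12, h21, hg1, hg2, hdrop3, hg2p, hg3p, pv_beg]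

-- ===== VERDICT (by name: the statement is the Claim_ definition above) =====
theorem convert_poem_to_anki_flashcards_spec : Claim_equal_convert_poem_to_anki_flashcards := by
  intro poem _ hpre
  exact pv_main poem hpre
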